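-- pv_equiv track=rewrite | github.com/curl-grad-rag/Puzzle-AdventOfCode | functions.py | reducePassPossibilities
-- ===== SOURCE A (Python) =====
-- def reducePassPossibilities(validOpts):
--     validOptsRed = []
--     for num in validOpts:
--         digits = [int(x) for x in str(num)]
--         largeGroup = False
--         for curr in set(digits):
--             if digits.count(curr) == 2:
--                 largeGroup = True
--                 break
--         if (largeGroup):
--             validOptsRed.append(num)
--     return validOptsRed
-- ===== SOURCE B (Python) =====
-- def hasRunOfTwo(s):
--     prev = None
--     run = 0
--     for ch in s:
--         if ch == prev:
--             run += 1
--         else: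
--             if run == 2:
--                 return True
--             prev = ch
--             run = 1
--     return run == 2
--
--
-- def reducePassPossibilities(validOpts):
--     validOptsRed = []
--     for num in validOpts:
--         if hasRunOfTwo(sorted(str(num))):
--             validOptsRed.append(num)
--     return validOptsRed
-- ===== Notes on version B (the rewrite author's own statement) =====
-- stated objective: alternative
-- what changed: B sorts each number's digit string and scans it once for a run of consecutive equal characters of length exactly 2, instead of A's distinct-digit set with a repeated list.count scan per distinct digit.
import Mathlib
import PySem

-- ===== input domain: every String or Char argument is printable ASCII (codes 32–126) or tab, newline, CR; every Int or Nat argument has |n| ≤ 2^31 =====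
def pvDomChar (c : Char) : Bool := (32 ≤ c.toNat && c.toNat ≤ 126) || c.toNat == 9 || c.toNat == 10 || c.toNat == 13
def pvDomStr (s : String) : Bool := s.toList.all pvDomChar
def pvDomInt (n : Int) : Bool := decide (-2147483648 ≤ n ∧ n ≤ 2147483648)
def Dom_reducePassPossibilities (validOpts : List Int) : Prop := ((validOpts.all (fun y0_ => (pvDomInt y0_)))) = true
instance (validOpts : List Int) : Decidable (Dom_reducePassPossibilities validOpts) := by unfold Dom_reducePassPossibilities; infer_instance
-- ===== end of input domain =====

-- B sorts each number's character string and scans it once counting runs of equal characters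
-- (accept on a run of length exactly 2), instead of A's distinct-digit set with a repeated .count scan.


-- ===== PORT A =====
-- int(x) for a single character x: exact for the digit characters '0'..'9', which are the only
-- characters of str(num) under Pre_ (num ≥ 0); on other characters Python raises (excluded by Pre_).
def pvCharInt (c : Char) : Int := (c.toNat : Int) - 48

def reducePassPossibilities (validOpts : List Int) : List Int :=
  validOpts.foldl (fun acc num =>
    let digits := (PySem.Int.toChars num).map pvCharInt
    -- 'for curr in set(digits): if …: largeGroup = True; break' only sets a boolean,
    -- so the result is independent of the set's iteration order: ported as any over the Set.
    let largeGroup := (PySem.Set.ofList digits).any (fun curr => PySem.List.count digits curr == 2)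
    if largeGroup then acc ++ [num] else acc) []

-- ===== PORT B =====
-- the 'for ch in s' loop of Source B's hasRunOfTwo, state = (prev, run)
def pvHasRunOfTwoGo (prev : Option Char) (run : Nat) : List Char → Bool
  | [] => run == 2
  | ch :: rest =>
    if (some ch) == prev then pvHasRunOfTwoGo prev (run + 1) rest
    else if run == 2 then true
    else pvHasRunOfTwoGo (some ch) 1 rest

def pvHasRunOfTwo (s : List Char) : Bool := pvHasRunOfTwoGo none 0 s

def reducePassPossibilities_alt (validOpts : List Int) : List Int :=
  validOpts.foldl (fun acc num =>
    if pvHasRunOfTwo (PySem.List.sorted (PySem.Int.toChars num) (fun x => x) false)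
    then acc ++ [num] else acc) []

-- ===== PRECONDITION & SPEC =====
-- Pre_ excludes lists with a negative element: there Python A raises ValueError (int('-')).
def Pre_reducePassPossibilities (validOpts : List Int) : Prop := ∀ x ∈ validOpts, 0 ≤ x
instance (validOpts : List Int) : Decidable (Pre_reducePassPossibilities validOpts) := by unfold Pre_reducePassPossibilities; infer_instance
def pvWitness_reducePassPossibilities : List Int := [122, 3, 11, 21033]

def Spec_reducePassPossibilities (validOpts : List Int) (out : List Int) : Prop := out = reducePassPossibilities_alt validOpts
instance (validOpts : List Int) (out : List Int) : Decidable (Spec_reducePassPossibilities validOpts out) := by unfold Spec_reducePassPossibilities; infer_instance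

-- ===== CLAIM (what is proved, stated in full; the proofs are below) =====
def Claim_equal_reducePassPossibilities : Prop := ∀ (validOpts : List Int), Dom_reducePassPossibilities validOpts → Pre_reducePassPossibilities validOpts → Spec_reducePassPossibilities validOpts (reducePassPossibilities validOpts)

-- ===== LEMMAS AND PROOFS =====

theorem pvCharInt_inj : Function.Injective pvCharInt := by
  intro a b h
  simp only [pvCharInt, sub_left_inj, Int.natCast_inj] at h
  exact Char.ext (UInt32.toNat_inj.mp h)

theorem mem_takeWhile_eq {c x : Char} {r : List Char} (h : x ∈ r.takeWhile (· == c)) : x = c := by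
  have := List.mem_takeWhile_imp h
  simpa [beq_iff_eq] using this

theorem mem_dropWhile_gt (c : Char) : ∀ (r : List Char), r.Pairwise (· ≤ ·) →
    (∀ x ∈ r, c ≤ x) → ∀ x ∈ r.dropWhile (· == c), c < x := by
  intro r
  induction r with
  | nil => intro _ _ x hx; simp at hx
  | cons a t ih =>
    intro hp hall x hx
    rcases List.pairwise_cons.mp hp with ⟨ha, hpt⟩
    by_cases hac : a = c
    · subst hac
      rw [List.dropWhile_cons_of_pos (by simp)] at hx
      exact ih hpt (fun y hy => ha y hy) x hx
    · rw [List.dropWhile_cons_of_neg (by simp [hac])] at hx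
      have hca : c < a := lt_of_le_of_ne (hall a (by simp)) (fun h => hac h.symm)
      rcases List.mem_cons.mp hx with rfl | hx
      · exact hca
      · exact lt_of_lt_of_le hca (ha x hx)

theorem count_takeWhile_self (c : Char) (r : List Char) :
    (r.takeWhile (· == c)).count c = (r.takeWhile (· == c)).length := by
  rw [List.count_eq_length]
  intro b hb
  simp [mem_takeWhile_eq hb]

-- decomposition of 'some character occurs exactly twice' for a sorted c :: r:
-- either the leading run of c has length 2, or it happens inside the rest after that run
theorem exists_count_two_cons (c : Char) (r : List Char) (hp : (c :: r).Pairwise (· ≤ ·)) :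
    (∃ x ∈ c :: r, (c :: r).count x = 2) ↔
      ((r.takeWhile (· == c)).length + 1 = 2 ∨
        ∃ x ∈ r.dropWhile (· == c), (r.dropWhile (· == c)).count x = 2) := by
  rcases List.pairwise_cons.mp hp with ⟨hall, hpr⟩
  have hsplit : r.takeWhile (· == c) ++ r.dropWhile (· == c) = r :=
    List.takeWhile_append_dropWhile
  have hdgt : ∀ x ∈ r.dropWhile (· == c), c < x := mem_dropWhile_gt c r hpr hall
  have hcount_c : (c :: r).count c = (r.takeWhile (· == c)).length + 1 := by
    have h2 : (r.dropWhile (· == c)).count c = 0 := by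
      rw [List.count_eq_zero]
      intro hc; exact absurd rfl (ne_of_gt (hdgt c hc))
    have h1 : (r.takeWhile (· == c)).count c = (r.takeWhile (· == c)).length :=
      count_takeWhile_self c r
    conv_lhs => rw [← hsplit]
    rw [List.count_cons_self, List.count_append]
    omega
  have hcount_d : ∀ x ∈ r.dropWhile (· == c),
      (c :: r).count x = (r.dropWhile (· == c)).count x := by
    intro x hx
    have hxc : x ≠ c := ne_of_gt (hdgt x hx)
    have ht0 : (r.takeWhile (· == c)).count x = 0 := by
      rw [List.count_eq_zero]
      intro hxt; exact hxc (mem_takeWhile_eq hxt)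
    conv_lhs => rw [← hsplit]
    rw [List.count_cons, List.count_append]
    simp [ht0, Ne.symm hxc]
  constructor
  · rintro ⟨x, hx, hcx⟩
    rcases List.mem_cons.mp hx with rfl | hx
    · exact Or.inl (hcount_c ▸ hcx)
    · rw [← hsplit] at hx
      rcases List.mem_append.mp hx with hx | hx
      · have := mem_takeWhile_eq hx; subst this
        exact Or.inl (hcount_c ▸ hcx)
      · exact Or.inr ⟨x, hx, by rw [← hcount_d x hx]; exact hcx⟩
  · rintro (h2 | ⟨x, hx, hcx⟩)
    · exact ⟨c, by simp, by rw [hcount_c, h2]⟩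
    · refine ⟨x, ?_, by rw [hcount_d x hx]; exact hcx⟩
      exact List.mem_cons_of_mem c (hsplit ▸ List.mem_append_right _ hx)

-- invariant of Source B's scanning loop on a sorted remainder: run counts the pending run of p
theorem go_some_iff : ∀ (s : List Char) (p : Char) (k : Nat), s.Pairwise (· ≤ ·) →
    (pvHasRunOfTwoGo (some p) k s = true ↔
      k + (s.takeWhile (· == p)).length = 2 ∨
        ∃ x ∈ s.dropWhile (· == p), (s.dropWhile (· == p)).count x = 2) := by
  intro s
  induction s with
  | nil =>
    intro p k _
    simp [pvHasRunOfTwoGo]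
  | cons x rest ih =>
    intro p k hp
    rcases List.pairwise_cons.mp hp with ⟨_, hpr⟩
    by_cases hxp : x = p
    · subst hxp
      rw [List.takeWhile_cons_of_pos (by simp), List.dropWhile_cons_of_pos (by simp)]
      rw [show pvHasRunOfTwoGo (some x) k (x :: rest) = pvHasRunOfTwoGo (some x) (k + 1) rest
            from by simp [pvHasRunOfTwoGo]]
      rw [ih x (k + 1) hpr]
      constructor
      · rintro (h | h)
        · exact Or.inl (by simp only [List.length_cons]; omega)
        · exact Or.inr h
      · rintro (h | h)
        · exact Or.inl (by simp only [List.length_cons] at h; omega)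
        · exact Or.inr h
    · rw [List.takeWhile_cons_of_neg (by simp [hxp]), List.dropWhile_cons_of_neg (by simp [hxp])]
      rw [show pvHasRunOfTwoGo (some p) k (x :: rest) =
            (if k == 2 then true else pvHasRunOfTwoGo (some x) 1 rest)
            from by simp [pvHasRunOfTwoGo, hxp]]
      by_cases hk : k = 2
      · simp [hk]
      · rw [if_neg (by simpa using hk), ih x 1 hpr]
        have := (exists_count_two_cons x rest hp).symm
        constructor
        · intro h
          refine Or.inr (this.mp ?_)
          rcases h with h | h
          · exact Or.inl (by omega)
          · exact Or.inr h
        · rintro (h | h)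
          · exact absurd (by simpa using h) hk
          · rcases this.mpr h with h' | h'
            · exact Or.inl (by omega)
            · exact Or.inr h'

theorem pvHasRunOfTwo_sorted_iff (s : List Char) (hp : s.Pairwise (· ≤ ·)) :
    pvHasRunOfTwo s = true ↔ ∃ x ∈ s, s.count x = 2 := by
  cases s with
  | nil => simp [pvHasRunOfTwo, pvHasRunOfTwoGo]
  | cons c rest =>
    rcases List.pairwise_cons.mp hp with ⟨_, hpr⟩
    rw [show pvHasRunOfTwo (c :: rest) = pvHasRunOfTwoGo (some c) 1 rest
          from by simp [pvHasRunOfTwo, pvHasRunOfTwoGo]]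
    rw [go_some_iff rest c 1 hpr]
    have h := exists_count_two_cons c rest hp
    constructor
    · rintro (h1 | h1)
      · exact h.mpr (Or.inl (by omega))
      · exact h.mpr (Or.inr h1)
    · intro h1
      rcases h.mp h1 with h2 | h2
      · exact Or.inl (by omega)
      · exact Or.inr h2

theorem pred_eq (num : Int) :
    ((PySem.Set.ofList ((PySem.Int.toChars num).map pvCharInt)).any
      (fun curr => PySem.List.count ((PySem.Int.toChars num).map pvCharInt) curr == 2))
    = pvHasRunOfTwo (PySem.List.sorted (PySem.Int.toChars num) (fun x => x) false) := by
  set l := PySem.Int.toChars num with hl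
  set s := PySem.List.sorted l (fun x => x) false with hs
  have hperm : s.Perm l := PySem.List.sorted_perm l (fun x => x) false
  have hsp : s.Pairwise (· ≤ ·) := by
    simpa using PySem.List.sorted_pairwise (xs := l) (key := fun x => x)
  have lhs_iff : ((PySem.Set.ofList (l.map pvCharInt)).any
      (fun curr => PySem.List.count (l.map pvCharInt) curr == 2)) = true ↔
      ∃ c ∈ l, l.count c = 2 := by
    rw [List.any_eq_true]
    constructor
    · rintro ⟨d, hd, hcd⟩
      have hd' : d ∈ l.map pvCharInt := (PySem.Set.mem_ofList _ _).mp hd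
      rcases List.mem_map.mp hd' with ⟨c, hc, rfl⟩
      refine ⟨c, hc, ?_⟩
      have h2 : PySem.List.count (l.map pvCharInt) (pvCharInt c) = 2 := by
        simpa using hcd
      rwa [PySem.List.count_eq, List.count_map_of_injective _ _ pvCharInt_inj] at h2
    · rintro ⟨c, hc, hcc⟩
      refine ⟨pvCharInt c, (PySem.Set.mem_ofList _ _).mpr (List.mem_map_of_mem hc), ?_⟩
      simp [PySem.List.count_eq, List.count_map_of_injective _ _ pvCharInt_inj, hcc]
  have rhs_iff : pvHasRunOfTwo s = true ↔ ∃ c ∈ l, l.count c = 2 := by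
    rw [pvHasRunOfTwo_sorted_iff s hsp]
    constructor
    · rintro ⟨c, hc, hcc⟩
      exact ⟨c, hperm.mem_iff.mp hc, by rw [← hperm.count_eq]; exact hcc⟩
    · rintro ⟨c, hc, hcc⟩
      exact ⟨c, hperm.mem_iff.mpr hc, by rw [hperm.count_eq]; exact hcc⟩
  rw [Bool.eq_iff_iff]
  exact lhs_iff.trans rhs_iff.symm

-- ===== VERDICT (by name: the statement is the Claim_ definition above) =====
theorem reducePassPossibilities_spec : Claim_equal_reducePassPossibilities := by
  intro validOpts _ _
  unfold Spec_reducePassPossibilities reducePassPossibilities reducePassPossibilities_alt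
  simp only [pred_eq]
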